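-- pv_equiv track=rewrite | github.com/gyeomh/LEGO-EVAL | preprocess/adj_functions.py | get_window_list
-- ===== SOURCE A (Python) =====
-- def get_window_list(scene: dict, room_list) -> dict:
--
--     output = {}
--     for room in room_list:
--         output[room] = []
--     for window in scene.get("windows", []):
--         if window["roomId"] in room_list:
--             if 'exterior' not in window["roomId"]:
--                 output[window["roomId"]].append(window["id"])
--
--     return output
-- ===== SOURCE B (Python) =====
-- def get_window_list(scene: dict, room_list) -> dict:
--     windows = scene.get("windows", [])
--     return {
--         room: [w["id"] for w in windows
--                if w["roomId"] == room and 'exterior' not in room]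
--         for room in room_list
--     }
-- ===== Notes on version B (the rewrite author's own statement) =====
-- stated objective: simpler
-- what changed: A seeds every room with [] and then makes one forward pass over the windows appending into the dict; B is a single dict comprehension that, for each room, rescans the windows list and collects the matching ids directly.
import Mathlib
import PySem

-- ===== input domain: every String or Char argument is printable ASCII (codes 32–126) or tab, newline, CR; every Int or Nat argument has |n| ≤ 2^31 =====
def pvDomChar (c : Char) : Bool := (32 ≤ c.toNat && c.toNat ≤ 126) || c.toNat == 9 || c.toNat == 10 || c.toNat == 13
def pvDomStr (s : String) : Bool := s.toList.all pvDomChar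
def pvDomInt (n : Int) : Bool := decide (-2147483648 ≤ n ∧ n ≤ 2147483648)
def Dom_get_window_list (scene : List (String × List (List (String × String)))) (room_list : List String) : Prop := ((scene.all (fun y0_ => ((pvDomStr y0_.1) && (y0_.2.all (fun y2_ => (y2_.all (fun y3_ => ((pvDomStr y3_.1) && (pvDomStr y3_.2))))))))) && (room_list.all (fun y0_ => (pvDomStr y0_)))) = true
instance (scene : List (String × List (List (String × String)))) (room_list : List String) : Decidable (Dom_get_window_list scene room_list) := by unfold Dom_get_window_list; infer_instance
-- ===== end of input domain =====

-- B replaces A's seed-empty-then-append forward pass over the windows (dict-index writes)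
-- by a per-room dict comprehension that rescans the windows list once per room (objective: simpler).

-- ===== PORT A =====
-- A: seed every room with [], then one forward pass over windows appending ids.
def get_window_list (scene : List (String × List (List (String × String)))) (room_list : List String) : List (String × List String) :=
  let output : PySem.Dict String (List String) :=
    room_list.foldl (fun d room => d.insert room []) PySem.Dict.empty
  let windows : List (List (String × String)) := (PySem.Dict.mk scene).getD "windows" []
  (windows.foldl (fun d window =>
    match (PySem.Dict.mk window).get? "roomId" with
    | none => d  -- Python raises KeyError here; excluded by Pre_
    | some rid =>
      if rid ∈ room_list then
        if PySem.Str.isIn "exterior" rid = false then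
          match (PySem.Dict.mk window).get? "id" with
          | none => d  -- Python raises KeyError here; excluded by Pre_
          | some wid => d.modify rid [] (fun l => l ++ [wid])
        else d
      else d) output).items

-- ===== PORT B =====
-- B: a dict comprehension {room: [w["id"] for w in windows if w["roomId"] == room and 'exterior' not in room]}.
def get_window_list_alt (scene : List (String × List (List (String × String)))) (room_list : List String) : List (String × List String) :=
  let windows : List (List (String × String)) := (PySem.Dict.mk scene).getD "windows" []
  (room_list.foldl (fun d room =>
      d.insert room (windows.filterMap (fun w =>
        if (PySem.Dict.mk w).get? "roomId" = some room ∧ PySem.Str.isIn "exterior" room = false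
        then (PySem.Dict.mk w).get? "id" else none)))  -- w["id"]: KeyError where none; excluded by Pre_
    PySem.Dict.empty).items

-- ===== PRECONDITION & SPEC =====
-- Pre_ excludes exactly the inputs where Python A raises KeyError: a window without a
-- "roomId" key, or a window whose roomId is a non-exterior member of room_list but that
-- has no "id" key. It excludes no input on which A returns.
def Pre_get_window_list (scene : List (String × List (List (String × String)))) (room_list : List String) : Prop :=
  (((PySem.Dict.mk scene).getD "windows" []).all (fun w =>
    match (PySem.Dict.mk w).get? "roomId" with
    | none => false
    | some rid =>
      !(decide (rid ∈ room_list) && !(PySem.Str.isIn "exterior" rid)) || (PySem.Dict.mk w).contains "id")) = true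
instance (scene : List (String × List (List (String × String)))) (room_list : List String) : Decidable (Pre_get_window_list scene room_list) := by unfold Pre_get_window_list; infer_instance
def pvWitness_get_window_list : (List (String × List (List (String × String)))) × List String :=
  ([("windows", [[("roomId", "hall"), ("id", "w1")], [("roomId", "ext")]])], ["hall"])
def Spec_get_window_list (scene : List (String × List (List (String × String)))) (room_list : List String) (out : List (String × List String)) : Prop := out = get_window_list_alt scene room_list
instance (scene : List (String × List (List (String × String)))) (room_list : List String) (out : List (String × List String)) : Decidable (Spec_get_window_list scene room_list out) := by unfold Spec_get_window_list; infer_instance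

-- ===== CLAIM (what is proved, stated in full; the proofs are below) =====
def Claim_equal_get_window_list : Prop := ∀ (scene : List (String × List (List (String × String)))) (room_list : List String), Dom_get_window_list scene room_list → Pre_get_window_list scene room_list → Spec_get_window_list scene room_list (get_window_list scene room_list)

-- ===== LEMMAS AND PROOFS =====

-- the per-room selection B computes
def pvSel (windows : List (List (String × String))) (_room_list : List String) (r : String) : List String :=
  windows.filterMap (fun w =>
    if (PySem.Dict.mk w).get? "roomId" = some r ∧ PySem.Str.isIn "exterior" r = false
    then (PySem.Dict.mk w).get? "id" else none)

-- a fold of inserts whose value depends only on the key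
theorem get?_foldl_insert_fun (l : List String) (g : String → List String)
    (d : PySem.Dict String (List String)) (k : String) :
    (l.foldl (fun d r => d.insert r (g r)) d).get? k
      = if k ∈ l then some (g k) else d.get? k := by
  induction l generalizing d with
  | nil => simp
  | cons r rest ih =>
    simp only [List.foldl_cons, ih, List.mem_cons]
    by_cases hk : k ∈ rest
    · simp [hk]
    · by_cases hkr : k = r
      · subst hkr; simp [hk]
      · simp [hk, hkr, PySem.Dict.get?_insert]

-- A's window loop: step by step, under the invariant that every room of room_list is a key
theorem loopA_getD (room_list : List String) (ws : List (List (String × String)))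
    (d : PySem.Dict String (List String)) (r : String) (hr : r ∈ room_list) :
    (ws.foldl (fun d window =>
      match (PySem.Dict.mk window).get? "roomId" with
      | none => d
      | some rid =>
        if rid ∈ room_list then
          if PySem.Str.isIn "exterior" rid = false then
            match (PySem.Dict.mk window).get? "id" with
            | none => d
            | some wid => d.modify rid [] (fun l => l ++ [wid])
          else d
        else d) d).getD r []
      = d.getD r [] ++ pvSel ws room_list r := by
  induction ws generalizing d with
  | nil => simp [pvSel]
  | cons w rest ih =>
    simp only [List.foldl_cons]
    rcases hrid : (PySem.Dict.mk w).get? "roomId" with _ | rid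
    · have hskip : pvSel (w :: rest) room_list r = pvSel rest room_list r := by
        have hneg : ¬((PySem.Dict.mk w).get? "roomId" = some r ∧ PySem.Str.isIn "exterior" r = false) := by
          simp [hrid]
        simp only [pvSel, List.filterMap_cons, if_neg hneg]
      rw [ih, hskip]
    · by_cases hmem : rid ∈ room_list
      · by_cases hext : PySem.Str.isIn "exterior" rid = false
        · rcases hid : (PySem.Dict.mk w).get? "id" with _ | wid
          · simp only [hmem, hext, if_true]
            have hskip : pvSel (w :: rest) room_list r = pvSel rest room_list r := by
              by_cases hrr : rid = r
              · have hcond : (PySem.Dict.mk w).get? "roomId" = some r := by rw [hrid, hrr]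
                have hext' : PySem.Str.isIn "exterior" r = false := hrr ▸ hext
                simp only [pvSel, List.filterMap_cons, hcond, hext', hid, and_self, if_true]
              · have hneg : ¬((PySem.Dict.mk w).get? "roomId" = some r ∧ PySem.Str.isIn "exterior" r = false) := by
                  rintro ⟨h1, _⟩; rw [hrid] at h1; cases h1; exact hrr rfl
                simp only [pvSel, List.filterMap_cons, if_neg hneg]
            rw [ih, hskip]
          · simp only [hmem, hext, if_true]
            rw [ih, PySem.Dict.getD_modify]
            by_cases hrr : r = rid
            · have hcond : (PySem.Dict.mk w).get? "roomId" = some r := by rw [hrid, hrr]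
              have hext' : PySem.Str.isIn "exterior" r = false := by rw [hrr]; exact hext
              have hcons : pvSel (w :: rest) room_list r = wid :: pvSel rest room_list r := by
                simp only [pvSel, List.filterMap_cons, hcond, hext', hid, and_self, if_true]
              rw [if_pos hrr, ← hrr, hcons]
              simp
            · have hneg : ¬((PySem.Dict.mk w).get? "roomId" = some r ∧ PySem.Str.isIn "exterior" r = false) := by
                rintro ⟨h1, _⟩; rw [hrid] at h1; cases h1; exact hrr rfl
              have hskip : pvSel (w :: rest) room_list r = pvSel rest room_list r := by
                simp only [pvSel, List.filterMap_cons, if_neg hneg]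
              simp [hrr, hskip]
        · simp only [hmem, if_true, hext, Bool.true_eq_false, if_false]
          have hneg : ¬((PySem.Dict.mk w).get? "roomId" = some r ∧ PySem.Str.isIn "exterior" r = false) := by
            rintro ⟨h1, h2⟩; rw [hrid] at h1; cases h1; exact hext h2
          have hskip : pvSel (w :: rest) room_list r = pvSel rest room_list r := by
            simp only [pvSel, List.filterMap_cons, if_neg hneg]
          rw [ih, hskip]
      · simp only [hmem, if_false]
        have hneg : ¬((PySem.Dict.mk w).get? "roomId" = some r ∧ PySem.Str.isIn "exterior" r = false) := by
          rintro ⟨h1, _⟩; rw [hrid] at h1; cases h1; exact hmem hr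
        have hskip : pvSel (w :: rest) room_list r = pvSel rest room_list r := by
          simp only [pvSel, List.filterMap_cons, if_neg hneg]
        rw [ih, hskip]

-- A's window loop never changes the key list, given every room_list room is already a key
theorem loopA_keys (room_list : List String) (ws : List (List (String × String)))
    (d : PySem.Dict String (List String)) (hc : ∀ r ∈ room_list, d.contains r = true) :
    (ws.foldl (fun d window =>
      match (PySem.Dict.mk window).get? "roomId" with
      | none => d
      | some rid =>
        if rid ∈ room_list then
          if PySem.Str.isIn "exterior" rid = false then
            match (PySem.Dict.mk window).get? "id" with
            | none => d
            | some wid => d.modify rid [] (fun l => l ++ [wid])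
          else d
        else d) d).keys = d.keys := by
  induction ws generalizing d with
  | nil => simp
  | cons w rest ih =>
    simp only [List.foldl_cons]
    rcases hrid : (PySem.Dict.mk w).get? "roomId" with _ | rid
    · exact ih d hc
    · by_cases hmem : rid ∈ room_list
      · by_cases hext : PySem.Str.isIn "exterior" rid = false
        · rcases hid : (PySem.Dict.mk w).get? "id" with _ | wid
          · simp only [hmem, hext, if_true]
            exact ih d hc
          · simp only [hmem, hext, if_true]
            have hkeys : (d.modify rid [] (fun l => l ++ [wid])).keys = d.keys := by
              rw [PySem.Dict.keys_modify, PySem.Dict.keys_insert_of_contains]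
              exact hc rid hmem
            rw [ih _ (fun r hr => by rw [PySem.Dict.contains_modify]; simp [hc r hr]), hkeys]
        · simp only [hmem, if_true, hext]
          exact ih d hc
      · simp only [hmem, if_false]
        exact ih d hc

-- two dicts with the same (nodup) key list and the same lookups have the same items
theorem items_eq_of_keys_get? (d d' : PySem.Dict String (List String))
    (hk : d.keys = d'.keys) (hn : d.keys.Nodup)
    (hg : ∀ k ∈ d.keys, d.get? k = d'.get? k) : d.items = d'.items := by
  have hn' : d'.keys.Nodup := hk ▸ hn
  have hlen : d.items.length = d'.items.length := by
    have := congrArg List.length hk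
    simpa [PySem.Dict.keys] using this
  apply List.ext_getElem hlen
  intro i h1 h2
  have hfst : (d.items[i]).1 = (d'.items[i]).1 := by
    have : d.keys[i]'(by simpa [PySem.Dict.keys] using h1)
         = d'.keys[i]'(by simpa [PySem.Dict.keys] using h2) := by
      simp [hk]
    simpa [PySem.Dict.keys] using this
  have hmem1 : d.items[i] ∈ d.items := List.getElem_mem h1
  have hmem2 : d'.items[i] ∈ d'.items := List.getElem_mem h2
  have hg1 : d.get? (d.items[i]).1 = some (d.items[i]).2 := by
    have := PySem.Dict.get?_of_mem_items d (k := (d.items[i]).1) (v := (d.items[i]).2) (by simp) hn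
    exact this
  have hg2 : d'.get? (d'.items[i]).1 = some (d'.items[i]).2 := by
    have := PySem.Dict.get?_of_mem_items d' (k := (d'.items[i]).1) (v := (d'.items[i]).2) (by simp) hn'
    exact this
  have hmemk : (d.items[i]).1 ∈ d.keys := by
    simp only [PySem.Dict.keys]
    exact List.mem_map_of_mem hmem1
  have : some (d.items[i]).2 = some (d'.items[i]).2 := by
    rw [← hg1, hg ((d.items[i]).1) hmemk, hfst, hg2]
  have hsnd : (d.items[i]).2 = (d'.items[i]).2 := by simpa using this
  exact Prod.ext hfst hsnd

-- ===== VERDICT (by name: the statement is the Claim_ definition above) =====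
theorem get_window_list_spec : Claim_equal_get_window_list := by
  intro scene room_list _ _
  have main : ∀ (ws : List (List (String × String))),
      (ws.foldl (fun d window =>
        match (PySem.Dict.mk window).get? "roomId" with
        | none => d
        | some rid =>
          if rid ∈ room_list then
            if PySem.Str.isIn "exterior" rid = false then
              match (PySem.Dict.mk window).get? "id" with
              | none => d
              | some wid => d.modify rid [] (fun l => l ++ [wid])
            else d
          else d) (room_list.foldl (fun d room => d.insert room []) PySem.Dict.empty)).items
    = (room_list.foldl (fun d r => d.insert r (pvSel ws room_list r)) PySem.Dict.empty).items := by
    intro ws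
    set dinit : PySem.Dict String (List String) :=
      room_list.foldl (fun d room => d.insert room []) PySem.Dict.empty with hdinit
    set dB : PySem.Dict String (List String) :=
      room_list.foldl (fun d r => d.insert r (pvSel ws room_list r)) PySem.Dict.empty with hdB
    have hinit : ∀ k, dinit.get? k = if k ∈ room_list then some [] else PySem.Dict.empty.get? k :=
      fun k => get?_foldl_insert_fun room_list (fun _ => []) PySem.Dict.empty k
    have hB : ∀ k, dB.get? k = if k ∈ room_list then some (pvSel ws room_list k) else PySem.Dict.empty.get? k :=
      fun k => get?_foldl_insert_fun room_list (pvSel ws room_list) PySem.Dict.empty k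
    have hcinit : ∀ r ∈ room_list, dinit.contains r = true := by
      intro r hr
      rw [PySem.Dict.contains_eq_isSome_get?, hinit r]
      simp [hr]
    have hkinit : dinit.keys = PySem.Set.update PySem.Dict.empty.keys room_list :=
      PySem.Dict.keys_foldl_insert room_list (fun _ _ => []) PySem.Dict.empty
    have hkB : dB.keys = PySem.Set.update PySem.Dict.empty.keys room_list :=
      PySem.Dict.keys_foldl_insert room_list (fun _ r => pvSel ws room_list r) PySem.Dict.empty
    have hnodup : dinit.keys.Nodup :=
      PySem.Dict.nodup_keys_foldl_insert room_list (fun _ _ => []) PySem.Dict.empty PySem.Dict.nodup_keys_empty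
    have hka := loopA_keys room_list ws dinit hcinit
    set dA : PySem.Dict String (List String) := ws.foldl (fun d window =>
        match (PySem.Dict.mk window).get? "roomId" with
        | none => d
        | some rid =>
          if rid ∈ room_list then
            if PySem.Str.isIn "exterior" rid = false then
              match (PySem.Dict.mk window).get? "id" with
              | none => d
              | some wid => d.modify rid [] (fun l => l ++ [wid])
            else d
          else d) dinit with hdA
    apply items_eq_of_keys_get?
    · rw [hka, hkinit, hkB]
    · rw [hka]; exact hnodup
    · intro k hk
      rw [hka, hkinit] at hk
      have hkmem : k ∈ room_list := by
        have hupd : PySem.Set.update (PySem.Dict.empty : PySem.Dict String (List String)).keys room_list = PySem.Set.ofList room_list := by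
          simp [PySem.Set.update, PySem.Set.ofList, PySem.Dict.keys_empty]
        rw [hupd] at hk
        exact (PySem.Set.mem_ofList room_list k).mp hk
      have hAc : dA.contains k = true := by
        rw [PySem.Dict.contains_iff_mem_keys, hka, hkinit]
        exact hk
      have hAs : (dA.get? k).isSome = true := by
        rw [← PySem.Dict.contains_eq_isSome_get?]; exact hAc
      obtain ⟨v, hv⟩ := Option.isSome_iff_exists.mp hAs
      rw [hv, hB k]
      simp only [hkmem, if_true]
      have hgetd0 : dinit.getD k [] = [] := by
        rw [PySem.Dict.getD_eq_get?_getD, hinit k]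
        simp [hkmem]
      have hval : v = dinit.getD k [] ++ pvSel ws room_list k := by
        rw [← loopA_getD room_list ws dinit k hkmem, ← hdA, PySem.Dict.getD_eq_get?_getD, hv]
        rfl
      rw [hval, hgetd0]
      simp
  exact main ((PySem.Dict.mk scene).getD "windows" [])
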